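-- pv_equiv track=rewrite | github.com/zmrdltl/problemSolving | programmers/코딩 기초 트레이닝/문자열 묶기.py | solution
-- ===== SOURCE A (Python) =====
-- def solution(strArr):
--     answer = 0
--     dict = {}
--     for str in strArr:
--         dict[len(str)] = dict.get(len(str),0) + 1
--     for _, val in dict.items():
--         answer = max(answer, val)
--     return answer
-- ===== SOURCE B (Python) =====
-- def solution(strArr):
--     lens = sorted(len(s) for s in strArr)
--     if not lens:
--         return 0
--     prev = lens[0]
--     run = 1
--     best = 1
--     for v in lens[1:]:
--         if v == prev:
--             run += 1
--         else:
--             run = 1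
--         best = max(best, run)
--         prev = v
--     return best
-- ===== Notes on version B (the rewrite author's own statement) =====
-- stated objective: alternative
-- what changed: Replaces A's dict-of-counts plus a max over its values by sorting the lengths once and scanning the sorted list for the longest run of equal values.
import Mathlib
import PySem

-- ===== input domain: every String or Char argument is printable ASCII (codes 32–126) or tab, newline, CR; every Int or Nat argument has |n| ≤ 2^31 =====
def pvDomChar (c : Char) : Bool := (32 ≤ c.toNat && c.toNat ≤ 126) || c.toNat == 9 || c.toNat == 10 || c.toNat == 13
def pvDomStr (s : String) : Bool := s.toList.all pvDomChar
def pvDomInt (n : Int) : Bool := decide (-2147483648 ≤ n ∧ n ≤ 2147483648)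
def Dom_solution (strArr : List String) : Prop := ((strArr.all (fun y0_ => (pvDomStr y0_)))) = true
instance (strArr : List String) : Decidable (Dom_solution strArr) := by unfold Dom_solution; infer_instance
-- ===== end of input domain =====

-- B replaces A's dict of length-counts by sorting the lengths once and scanning for the
-- longest run of equal values (alternative algorithm, similar cost).

-- ===== PORT A =====
def solution (strArr : List String) : Int :=
  (strArr.foldl
    (fun d s => d.insert (PySem.Str.len s) (d.getD (PySem.Str.len s) 0 + 1))
    PySem.Dict.empty).items.foldl (fun answer p => max answer p.2) 0

-- ===== PORT B =====
-- one loop step of Source B: state = (prev, run, best)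
def pvStep (st : Int × Int × Int) (v : Int) : Int × Int × Int :=
  let run := if v = st.1 then st.2.1 + 1 else 1
  (v, run, max st.2.2 run)

def solution_alt (strArr : List String) : Int :=
  match PySem.List.sorted (strArr.map (fun s => PySem.Str.len s)) (fun x => x) false with
  | [] => 0
  | x :: t => (t.foldl pvStep (x, 1, 1)).2.2

-- ===== PRECONDITION & SPEC =====
def Spec_solution (strArr : List String) (out : Int) : Prop := out = solution_alt strArr
instance (strArr : List String) (out : Int) : Decidable (Spec_solution strArr out) := by unfold Spec_solution; infer_instance

-- ===== CLAIM (what is proved, stated in full; the proofs are below) =====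
def Claim_equal_solution : Prop := ∀ (strArr : List String), Dom_solution strArr → Spec_solution strArr (solution strArr)

-- ===== LEMMAS AND PROOFS =====

-- r is the maximum multiplicity of an element of L (meaningful for nonempty L)
def IsMaxCount (L : List Int) (r : Int) : Prop :=
  (∃ k ∈ L, r = (L.count k : Int)) ∧ ∀ k ∈ L, (L.count k : Int) ≤ r

theorem isMaxCount_unique {L : List Int} {r₁ r₂ : Int}
    (h₁ : IsMaxCount L r₁) (h₂ : IsMaxCount L r₂) : r₁ = r₂ := by
  obtain ⟨⟨k₁, hk₁, he₁⟩, hb₁⟩ := h₁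
  obtain ⟨⟨k₂, hk₂, he₂⟩, hb₂⟩ := h₂
  have := hb₂ k₁ hk₁
  have := hb₁ k₂ hk₂
  omega

theorem isMaxCount_perm {L L' : List Int} {r : Int} (hp : L.Perm L')
    (h : IsMaxCount L r) : IsMaxCount L' r := by
  obtain ⟨⟨k, hk, he⟩, hb⟩ := h
  exact ⟨⟨k, hp.mem_iff.mp hk, by rw [← hp.count_eq]; exact he⟩,
    fun k hk' => by rw [← hp.count_eq]; exact hb k (hp.mem_iff.mpr hk')⟩

-- A's value is the max count of the length list
theorem solution_isMaxCount (strArr : List String) (h : strArr ≠ []) :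
    IsMaxCount (strArr.map (fun s => PySem.Str.len s)) (solution strArr) := by
  set L := strArr.map (fun s => PySem.Str.len s) with hL
  have hLne : L ≠ [] := by simpa [hL] using h
  have hfm : strArr.foldl
      (fun (d : PySem.Dict Int Int) s => d.insert (PySem.Str.len s) (d.getD (PySem.Str.len s) 0 + 1))
      PySem.Dict.empty
      = L.foldl (fun (d : PySem.Dict Int Int) x => d.insert x (d.getD x 0 + 1)) PySem.Dict.empty := by
    rw [hL, List.foldl_map]
  have hsol : solution strArr
      = ((PySem.Set.ofList L).map (fun k => (L.count k : Int))).foldl max 0 := by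
    unfold solution
    rw [hfm, PySem.Dict.foldl_insert_getD_add_one_eq_counter,
      PySem.Dict.items_counter, List.foldl_map, List.foldl_map]
  rw [hsol]
  set M := (PySem.Set.ofList L).map (fun k => (L.count k : Int)) with hM
  have hub := (PySem.List.le_foldl_max M 0).2
  have hmem := PySem.List.foldl_max_mem M 0
  obtain ⟨y, hy⟩ := List.exists_mem_of_ne_nil L hLne
  have hyM : (L.count y : Int) ∈ M := by
    exact List.mem_map.mpr ⟨y, (PySem.Set.mem_ofList L y).mpr hy, rfl⟩
  have hy1 : 0 < L.count y := List.count_pos_iff.mpr hy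
  have hne0 : M.foldl max 0 ≠ 0 := by
    have := hub _ hyM; omega
  rcases hmem with h0 | hmem
  · exact absurd h0 hne0
  · obtain ⟨k, hk, he⟩ := List.mem_map.mp hmem
    refine ⟨⟨k, (PySem.Set.mem_ofList L k).mp hk, he.symm⟩, fun k' hk' => ?_⟩
    exact hub _ (List.mem_map.mpr ⟨k', (PySem.Set.mem_ofList L k').mpr hk', rfl⟩)

-- the scan invariant of Source B's loop on a sorted list:
-- prev is the last (hence largest) element seen, run is its multiplicity, best the max count
theorem scan_spec (t : List Int) (x : Int) (hs : (x :: t).Pairwise (· ≤ ·)) :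
    (t.foldl pvStep (x, 1, 1)).1 ∈ x :: t
    ∧ (∀ k ∈ x :: t, k ≤ (t.foldl pvStep (x, 1, 1)).1)
    ∧ (t.foldl pvStep (x, 1, 1)).2.1 = ((x :: t).count (t.foldl pvStep (x, 1, 1)).1 : Int)
    ∧ IsMaxCount (x :: t) (t.foldl pvStep (x, 1, 1)).2.2 := by
  induction t using List.reverseRecOn with
  | nil =>
    simp only [List.foldl_nil]
    refine ⟨by simp, ?_, by simp, ⟨⟨x, by simp, by simp⟩, ?_⟩⟩
    · intro k hk; simp at hk; omega
    · intro k hk; simp at hk; subst hk; simp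
  | append_singleton t' v ih =>
    have hS : x :: (t' ++ [v]) = (x :: t') ++ [v] := by simp
    have hs' : (x :: t').Pairwise (· ≤ ·) := by
      refine List.Pairwise.sublist ?_ hs
      exact List.Sublist.cons₂ x (List.sublist_append_left t' [v])
    have hle : ∀ a ∈ x :: t', a ≤ v := by
      rw [hS] at hs
      have := (List.pairwise_append.mp hs).2.2
      intro a ha; exact this a ha v (by simp)
    obtain ⟨hmem, hub, hrun, ⟨⟨k₀, hk₀, hbe⟩, hbub⟩⟩ := ih hs'
    set st := t'.foldl pvStep (x, 1, 1) with hst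
    have hfold : (t' ++ [v]).foldl pvStep (x, 1, 1) = pvStep st v := by
      rw [List.foldl_append]; rfl
    have hcnt1 : ∀ w : Int, (x :: (t' ++ [v])).count w
        = (x :: t').count w + (if v = w then 1 else 0) := by
      intro w
      rw [hS, List.count_append]
      by_cases hw : v = w
      · subst hw; simp
      · have h0 : [v].count w = 0 := List.count_eq_zero.mpr (by
          intro hwv; simp at hwv; exact hw hwv.symm)
        rw [h0, if_neg hw]
    have hmm : ∀ k, k ∈ x :: (t' ++ [v]) → k ≠ v → k ∈ x :: t' := by
      intro k hk hkv
      rcases List.mem_cons.mp hk with h | h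
      · exact List.mem_cons.mpr (Or.inl h)
      · rcases List.mem_append.mp h with h2 | h2
        · exact List.mem_cons.mpr (Or.inr h2)
        · simp at h2; exact absurd h2 hkv
    by_cases hv : v = st.1
    · -- v extends the last run
      have hstep : pvStep st v = (v, st.2.1 + 1, max st.2.2 (st.2.1 + 1)) := by
        simp [pvStep, hv]
      rw [hfold, hstep]
      dsimp only
      have hcv : ((x :: (t' ++ [v])).count v : Int) = st.2.1 + 1 := by
        rw [hcnt1 v, if_pos rfl]
        push_cast
        rw [hrun, ← hv]
      refine ⟨by simp, ?_, hcv.symm, ?_, ?_⟩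
      · intro k hk
        by_cases hkv : k = v
        · omega
        · have := hle k (hmm k hk hkv); omega
      · -- witness for the max
        rcases le_total st.2.2 (st.2.1 + 1) with hc | hc
        · refine ⟨v, by simp, ?_⟩
          rw [max_eq_right hc]; exact hcv.symm
        · have hk₀v : k₀ ≠ v := by
            intro he
            rw [he, hv, ← hrun] at hbe
            omega
          refine ⟨k₀, by rw [hS]; exact List.mem_append_left _ hk₀, ?_⟩
          rw [max_eq_left hc, hcnt1 k₀, if_neg (fun h2 => hk₀v h2.symm)]
          push_cast
          omega
      · -- upper bound for the max
        intro k hk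
        by_cases hkv : k = v
        · subst hkv
          have := le_max_right st.2.2 (st.2.1 + 1)
          omega
        · have hk' : k ∈ x :: t' := hmm k hk hkv
          have hb := hbub k hk'
          have hml := le_max_left st.2.2 (st.2.1 + 1)
          rw [hcnt1 k, if_neg (fun h2 => hkv h2.symm)]
          push_cast
          omega
    · -- v starts a new run
      have hstep : pvStep st v = (v, 1, max st.2.2 1) := by
        simp [pvStep, hv]
      have hltv : st.1 ≤ v := hle st.1 hmem
      have hnotin : v ∉ x :: t' := by
        intro hvin
        exact hv (le_antisymm (hub v hvin) hltv)
      have hb1 : (1 : Int) ≤ st.2.2 := by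
        have hc := List.count_pos_iff.mpr hk₀
        omega
      rw [hfold, hstep, max_eq_left hb1]
      dsimp only
      have hcv : ((x :: (t' ++ [v])).count v : Int) = 1 := by
        rw [hcnt1 v, if_pos rfl, List.count_eq_zero.mpr hnotin]
        push_cast
      refine ⟨by simp, ?_, hcv.symm, ?_, ?_⟩
      · intro k hk
        by_cases hkv : k = v
        · omega
        · have := hle k (hmm k hk hkv); omega
      · refine ⟨k₀, by rw [hS]; exact List.mem_append_left _ hk₀, ?_⟩
        have hk₀v : v ≠ k₀ := fun he => hnotin (he ▸ hk₀)
        rw [hcnt1 k₀, if_neg hk₀v]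
        push_cast
        omega
      · intro k hk
        by_cases hkv : k = v
        · subst hkv; omega
        · have hb := hbub k (hmm k hk hkv)
          rw [hcnt1 k, if_neg (fun h2 => hkv h2.symm)]
          push_cast
          omega

-- B's value is the max count of the length list
theorem solution_alt_isMaxCount (strArr : List String) (h : strArr ≠ []) :
    IsMaxCount (strArr.map (fun s => PySem.Str.len s)) (solution_alt strArr) := by
  set L := strArr.map (fun s => PySem.Str.len s) with hL
  have hLne : L ≠ [] := by simpa [hL] using h
  have hSne : PySem.List.sorted L (fun x => x) false ≠ [] := by
    rw [Ne, PySem.List.sorted_eq_nil_iff]; exact hLne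
  obtain ⟨x, t, hxt⟩ := List.exists_cons_of_ne_nil hSne
  have hpw : (x :: t).Pairwise (· ≤ ·) := by
    have := PySem.List.sorted_pairwise L (fun x => x)
    rw [hxt] at this; exact this
  have halt : solution_alt strArr = (t.foldl pvStep (x, 1, 1)).2.2 := by
    unfold solution_alt
    rw [← hL, hxt]
  rw [halt]
  refine isMaxCount_perm ?_ (scan_spec t x hpw).2.2.2
  rw [← hxt]; exact PySem.List.sorted_perm L (fun x => x) false

-- ===== VERDICT (by name: the statement is the Claim_ definition above) =====
theorem solution_spec : Claim_equal_solution := by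
  intro strArr _
  unfold Spec_solution
  by_cases h : strArr = []
  · subst h; rfl
  · exact isMaxCount_unique (solution_isMaxCount strArr h) (solution_alt_isMaxCount strArr h)
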